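-- pv_equiv track=rewrite | github.com/nephtyws/problem-solving | programmers/Level 2/124 나라의 숫자.py | solution
-- ===== SOURCE A (Python) =====
-- def solution(n):
--     answer = ""
--     digits = ["4", "1", "2"]
--
--     while n > 0:
--         remainder = n % 3
--         n //= 3
--
--         if remainder == 0:
--             n -= 1
--
--         answer = digits[remainder] + answer
--
--     return answer
-- ===== SOURCE B (Python) =====
-- def solution(n):
--     # Block arithmetic: find the output length L, then write the rank within
--     # the length-L block as an L-digit base-3 numeral over the alphabet 1,2,4.
--     L, p, total = 0, 1, 0
--     while total < n:
--         L += 1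
--         p *= 3
--         total += p
--     m = n - (total - p) - 1
--     return _render(L, m)
--
--
-- def _render(L, m):
--     if L <= 0:
--         return ""
--     return _render(L - 1, m // 3) + ["1", "2", "4"][m % 3]
-- ===== Notes on version B (the rewrite author's own statement) =====
-- stated objective: alternative
-- what changed: Instead of A's digit-at-a-time loop with the 'borrow on remainder 0' correction, B first locates the output length L by summing block sizes 3+9+..., computes the zero-based rank m of n inside its length-L block, and renders m as a plain L-digit base-3 numeral over the alphabet 1,2,4.
import Mathlib
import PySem

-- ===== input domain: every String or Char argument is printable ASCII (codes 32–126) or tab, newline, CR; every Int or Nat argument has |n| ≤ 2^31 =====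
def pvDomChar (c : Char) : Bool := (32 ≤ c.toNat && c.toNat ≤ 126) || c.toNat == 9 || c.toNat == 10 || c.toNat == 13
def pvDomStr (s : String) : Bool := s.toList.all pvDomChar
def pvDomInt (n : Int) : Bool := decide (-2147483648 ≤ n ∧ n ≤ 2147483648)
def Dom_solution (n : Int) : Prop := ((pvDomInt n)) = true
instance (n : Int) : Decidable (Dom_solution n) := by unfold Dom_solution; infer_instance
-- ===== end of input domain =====

-- B replaces A's digit loop (with its borrow on remainder 0) by block arithmetic:
-- find the output length L, then render the rank inside the length-L block as an
-- L-digit base-3 numeral over the alphabet 1,2,4.  Objective: alternative.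

-- ===== PORT A =====
-- while n > 0: remainder = n % 3; n //= 3; if remainder == 0: n -= 1; answer = digits[remainder] + answer
def solutionGo (n : Int) (answer : String) : String :=
  if h : n > 0 then
    let remainder := PySem.Int.mod n 3
    let n1 := PySem.Int.floordiv n 3
    let n2 := if remainder = 0 then n1 - 1 else n1
    -- digits[remainder] is always in range (0 ≤ remainder < 3), so getD never fires
    solutionGo n2 ((PySem.List.pyGet? ["4", "1", "2"] remainder).getD "" ++ answer)
  else answer
termination_by n.toNat
decreasing_by
  have h3 : PySem.Int.floordiv n 3 = n / 3 := PySem.Int.floordiv_eq_ediv_of_pos (by omega)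
  have hm : PySem.Int.mod n 3 = n % 3 := PySem.Int.mod_eq_emod_of_pos (by omega)
  simp only [n2, n1, remainder, h3, hm]
  split <;> omega

def solution (n : Int) : String := solutionGo n ""

-- ===== PORT B =====
-- the while loop: while total < n: L += 1; p *= 3; total += p
-- (hp is a proof argument only, recording the loop invariant 0 < p needed for termination)
def findL (n L p total : Int) (hp : 0 < p) : Int × Int × Int :=
  if h : total < n then findL n (L + 1) (p * 3) (total + p * 3) (by omega) else (L, p, total)
termination_by (n - total).toNat
decreasing_by omega

-- _render(L, m): if L <= 0: return "" ; return _render(L-1, m // 3) + ["1","2","4"][m % 3]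
def render (L m : Int) : String :=
  if h : L > 0 then
    render (L - 1) (PySem.Int.floordiv m 3) ++ (PySem.List.pyGet? ["1", "2", "4"] (PySem.Int.mod m 3)).getD ""
  else ""
termination_by L.toNat
decreasing_by omega

def solution_alt (n : Int) : String :=
  let r := findL n 0 1 0 (by omega)
  render r.1 (n - (r.2.2 - r.2.1) - 1)

-- ===== PRECONDITION & SPEC =====
def Spec_solution (n : Int) (out : String) : Prop := out = solution_alt n
instance (n : Int) (out : String) : Decidable (Spec_solution n out) := by unfold Spec_solution; infer_instance

-- ===== CLAIM (what is proved, stated in full; the proofs are below) =====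
def Claim_equal_solution : Prop := ∀ (n : Int), Dom_solution n → Spec_solution n (solution n)

-- ===== LEMMAS AND PROOFS =====

-- common recursive characterisation: f n = f ((n-1)//3) ++ "124"[(n-1)%3]
def fSpec (n : Int) : String :=
  if h : n > 0 then
    fSpec ((n - 1) / 3) ++ (PySem.List.pyGet? ["1", "2", "4"] ((n - 1) % 3)).getD ""
  else ""
termination_by n.toNat
decreasing_by omega

-- count of strings strictly shorter than length k+1: off 0 = -1 (unused), off 1 = 0, off 2 = 3, off 3 = 12, …
def off : Nat → Int
  | 0 => -1
  | k + 1 => 3 * off k + 3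

lemma off_ge (k : Nat) : -1 ≤ off k := by
  induction k with
  | zero => simp [off]
  | succ k ih => simp only [off]; omega

lemma off_nonneg (k : Nat) (hk : 1 ≤ k) : 0 ≤ off k := by
  obtain ⟨j, rfl⟩ := Nat.exists_eq_add_of_le hk
  have := off_ge j
  simp only [Nat.add_comm, off]
  omega

lemma solutionGo_acc (fuel : Nat) (n : Int) (hfuel : n.toNat ≤ fuel) (acc : String) :
    solutionGo n acc = solutionGo n "" ++ acc := by
  induction fuel generalizing n acc with
  | zero =>
    have hn : ¬ n > 0 := by omega
    conv_lhs => rw [solutionGo]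
    conv_rhs => rw [solutionGo]
    rw [dif_neg hn, dif_neg hn]
    simp
  | succ N ih =>
    by_cases h : n > 0
    · conv_lhs => rw [solutionGo]
      conv_rhs => rw [solutionGo]
      rw [dif_pos h, dif_pos h]
      have hm : PySem.Int.mod n 3 = n % 3 := PySem.Int.mod_eq_emod_of_pos (by omega)
      have hd : PySem.Int.floordiv n 3 = n / 3 := PySem.Int.floordiv_eq_ediv_of_pos (by omega)
      set n2 : Int := if PySem.Int.mod n 3 = 0 then PySem.Int.floordiv n 3 - 1 else PySem.Int.floordiv n 3 with hn2
      have hlt : n2.toNat ≤ N := by rw [hn2, hm, hd]; split <;> omega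
      set d : String := (PySem.List.pyGet? ["4", "1", "2"] (PySem.Int.mod n 3)).getD "" with hdd
      rw [ih n2 hlt (d ++ acc), ih n2 hlt (d ++ "")]
      simp [String.append_assoc]
    · conv_lhs => rw [solutionGo]
      conv_rhs => rw [solutionGo]
      rw [dif_neg h, dif_neg h]
      simp

lemma solutionGo_eq_fSpec (n : Int) : solutionGo n "" = fSpec n := by
  induction n using fSpec.induct with
  | case1 n h ih =>
    rw [solutionGo, fSpec]
    simp only [dif_pos h]
    rw [solutionGo_acc (Int.toNat (if PySem.Int.mod n 3 = 0 then PySem.Int.floordiv n 3 - 1 else PySem.Int.floordiv n 3)) _ le_rfl]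
    have hm : PySem.Int.mod n 3 = n % 3 := PySem.Int.mod_eq_emod_of_pos (by omega)
    have hd : PySem.Int.floordiv n 3 = n / 3 := PySem.Int.floordiv_eq_ediv_of_pos (by omega)
    have h3 : n % 3 = 0 ∨ n % 3 = 1 ∨ n % 3 = 2 := by omega
    rcases h3 with h0 | h1 | h2
    · have hn2 : (if PySem.Int.mod n 3 = 0 then PySem.Int.floordiv n 3 - 1 else PySem.Int.floordiv n 3)
          = (n - 1) / 3 := by rw [hm, hd, if_pos h0]; omega
      have hr : (n - 1) % 3 = 2 := by omega
      rw [hn2, ih, hm, h0, hr]; rfl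
    · have hn2 : (if PySem.Int.mod n 3 = 0 then PySem.Int.floordiv n 3 - 1 else PySem.Int.floordiv n 3)
          = (n - 1) / 3 := by rw [hm, hd, if_neg (by omega)]; omega
      have hr : (n - 1) % 3 = 0 := by omega
      rw [hn2, ih, hm, h1, hr]; rfl
    · have hn2 : (if PySem.Int.mod n 3 = 0 then PySem.Int.floordiv n 3 - 1 else PySem.Int.floordiv n 3)
          = (n - 1) / 3 := by rw [hm, hd, if_neg (by omega)]; omega
      have hr : (n - 1) % 3 = 1 := by omega
      rw [hn2, ih, hm, h2, hr]; rfl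
  | case2 n h =>
    rw [solutionGo, fSpec]
    simp [dif_neg h]

-- the render recursion equals fSpec on the block of length-k outputs
lemma render_eq_fSpec (k : Nat) (hk : 1 ≤ k) (n : Int)
    (hlo : off k < n) (hhi : n ≤ off (k + 1)) :
    render (k : Int) (n - off k - 1) = fSpec n := by
  induction k generalizing n with
  | zero => omega
  | succ k ih =>
    have hn : 0 < n := by
      have := off_nonneg (k + 1) (by omega); omega
    rw [render, fSpec]
    rw [dif_pos (by push_cast; omega : ((k + 1 : Nat) : Int) > 0), dif_pos hn]
    have hcast : ((k + 1 : Nat) : Int) - 1 = (k : Int) := by push_cast; omega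
    rw [hcast]
    set m : Int := n - off (k + 1) - 1 with hm
    have hmd : PySem.Int.floordiv m 3 = m / 3 := PySem.Int.floordiv_eq_ediv_of_pos (by omega)
    have hmm : PySem.Int.mod m 3 = m % 3 := PySem.Int.mod_eq_emod_of_pos (by omega)
    have hoff : off (k + 1) = 3 * off k + 3 := rfl
    -- the last digits agree: m ≡ n - 1 (mod 3) because off (k+1) is divisible by 3
    have hdig : m % 3 = (n - 1) % 3 := by omega
    rcases Nat.eq_zero_or_pos k with hk0 | hk1
    · -- length-1 block: n ∈ {1,2,3}, the recursive calls render "" on both sides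
      subst hk0
      have hrend : render ((0 : Nat) : Int) (PySem.Int.floordiv m 3) = "" := by
        rw [render]; simp
      have hfs : fSpec ((n - 1) / 3) = "" := by
        have hn3 : n ≤ off 2 := hhi
        have h2 : off 2 = 3 := by simp [off]
        rw [fSpec, dif_neg (by omega)]
      rw [hrend, hfs, hmm, hdig]
    · -- length ≥ 2: the recursion steps into the block of length k
      have hoffk : off (k + 1 + 1) = 3 * off (k + 1) + 3 := rfl
      have hstep : m / 3 = (n - 1) / 3 - off k - 1 := by omega
      have hlo2 : off k < (n - 1) / 3 := by omega
      have hhi2 : (n - 1) / 3 ≤ off (k + 1) := by omega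
      rw [hmd, hstep, ih hk1 ((n - 1) / 3) hlo2 hhi2, hmm, hdig]

-- the search loop lands exactly on the block containing n
lemma findL_eq (fuel : Nat) (n L p total : Int) (hp : 0 < p)
    (hfuel : (n - total).toNat ≤ fuel) (K : Nat) (hL : L = (K : Int))
    (htot : total = off (K + 1)) (hP : p = off (K + 1) - off K) :
    ∃ K' : Nat, K ≤ K' ∧
      findL n L p total hp = ((K' : Int), off (K' + 1) - off K', off (K' + 1)) ∧
      n ≤ off (K' + 1) ∧ (total < n → off K' < n) ∧ (¬ total < n → K' = K) := by
  induction fuel generalizing K L p total with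
  | zero =>
    have hns : ¬ total < n := by omega
    rw [findL, dif_neg hns]
    exact ⟨K, le_rfl, by rw [hL, htot, hP], by omega, by omega, fun _ => rfl⟩
  | succ N ih =>
    by_cases hlt : total < n
    · rw [findL, dif_pos hlt]
      have h1 : off (K + 1) = 3 * off K + 3 := rfl
      have h2 : off (K + 1 + 1) = 3 * off (K + 1) + 3 := rfl
      obtain ⟨K', hKK, heq, hub, hlb, hstop⟩ :=
        ih (L + 1) (p * 3) (total + p * 3) (by omega) (by omega) (K + 1)
          (by omega) (by omega) (by omega)
      refine ⟨K', by omega, heq, hub, fun _ => ?_, fun hc => absurd hlt hc⟩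
      by_cases hlt2 : total + p * 3 < n
      · exact hlb hlt2
      · have := hstop hlt2
        subst this
        omega
    · rw [findL, dif_neg hlt]
      exact ⟨K, le_rfl, by rw [hL, htot, hP], by omega, by omega, fun _ => rfl⟩

lemma solution_alt_eq_fSpec (n : Int) : solution_alt n = fSpec n := by
  unfold solution_alt
  obtain ⟨K', hK0, heq, hub, hlb, hstop⟩ :=
    findL_eq (n - 0).toNat n 0 1 0 (by omega) le_rfl 0 (by simp) (by norm_num [off]) (by norm_num [off])
  rw [heq]
  simp only
  have hoffm : off (K' + 1) - (off (K' + 1) - off K') = off K' := by ring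
  rw [hoffm]
  by_cases hn : 0 < n
  · have hlo : off K' < n := hlb (by omega)
    have hK1 : 1 ≤ K' := by
      by_contra hc
      have hz : K' = 0 := by omega
      subst hz
      have h1 : off (0 + 1) = 0 := by norm_num [off]
      omega
    exact render_eq_fSpec K' hK1 n hlo hub
  · have hK : K' = 0 := hstop (by omega)
    subst hK
    have h0 : off 0 = -1 := rfl
    rw [fSpec, dif_neg hn, render, dif_neg (by norm_num)]

-- ===== VERDICT (by name: the statement is the Claim_ definition above) =====
theorem solution_spec : Claim_equal_solution := by
  intro n _
  unfold Spec_solution solution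
  rw [solutionGo_eq_fSpec, solution_alt_eq_fSpec]
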